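-- pv_equiv track=rewrite | github.com/MinChul-Son/for-Coding-Test | 11_27.py | solution
-- ===== SOURCE A (Python) =====
-- from collections import Counter
--
-- def solution(source):
--     dest = ''
--
--     while source:
--         tmp = Counter(source).items()
--         tmp = sorted(tmp)
--         new_source = ''
--         for i in range(len(tmp)):
--             dest += tmp[i][0]
--             new_source += tmp[i][0] * (tmp[i][1] - 1)
--
--         source = new_source
--     return dest
-- ===== SOURCE B (Python) =====
-- from collections import Counter
--
-- def solution(source):
--     counts = Counter(source)
--     if not counts:
--         return ''
--     rounds = max(counts.values())
--     parts = []
--     for k in range(1, rounds + 1):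
--         parts.append(''.join(sorted(c for c in counts if counts[c] >= k)))
--     return ''.join(parts)
-- ===== Notes on version B (the rewrite author's own statement) =====
-- stated objective: faster
-- what changed: Instead of repeatedly rebuilding, recounting and re-sorting the shrinking string round by round, B counts the characters once and, for each round k from 1 to the maximum count, emits the sorted characters whose count is at least k.
import Mathlib
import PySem

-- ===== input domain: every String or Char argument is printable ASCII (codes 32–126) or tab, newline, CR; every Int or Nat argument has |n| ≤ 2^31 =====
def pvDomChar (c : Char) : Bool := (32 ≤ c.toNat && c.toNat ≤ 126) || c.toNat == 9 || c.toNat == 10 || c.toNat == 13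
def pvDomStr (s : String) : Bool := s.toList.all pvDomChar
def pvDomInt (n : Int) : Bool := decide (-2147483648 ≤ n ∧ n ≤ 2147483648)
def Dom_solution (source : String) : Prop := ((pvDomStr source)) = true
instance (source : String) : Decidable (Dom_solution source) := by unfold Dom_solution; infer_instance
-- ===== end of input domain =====

-- B counts the characters once and, for each round k = 1 .. max count, emits the sorted
-- characters whose count is ≥ k, instead of A's rebuild/recount/re-sort of the shrinking string.

-- ===== PORT A =====
-- Helper lemmas needed by the port's termination proof (cited in decreasing_by).

theorem pvSumMapSubOne (l : List Char) (f : Char → Nat) (h : ∀ c ∈ l, 1 ≤ f c) :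
    (l.map (fun c => f c - 1)).sum = (l.map f).sum - l.length ∧ l.length ≤ (l.map f).sum := by
  induction l with
  | nil => simp
  | cons x t ih =>
    have hx := h x (by simp)
    have ht := ih (fun c hc => h c (by simp [hc]))
    simp only [List.map_cons, List.sum_cons, List.length_cons]
    omega

theorem pvSumCountOfList (s : List Char) :
    ((PySem.Set.ofList s).map (fun c => s.count c)).sum = s.length := by
  have hperm : (PySem.Set.ofList s).Perm s.dedup :=
    (List.perm_ext_iff_of_nodup (PySem.Set.nodup_ofList s) s.nodup_dedup).2
      (by intro a; simp [PySem.Set.mem_ofList, List.mem_dedup])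
  calc ((PySem.Set.ofList s).map (fun c => s.count c)).sum
      = (s.dedup.map (fun c => s.count c)).sum := (hperm.map _).sum_eq
    _ = s.length := List.sum_map_count_dedup_eq_length s

theorem pvNewSourceLen (s : List Char) (hs : s ≠ []) :
    ((PySem.List.sorted2 (PySem.Dict.counter s).items Prod.fst Prod.snd).flatMap
      (fun t => PySem.List.pyRepeat [t.1] (t.2 - 1))).length < s.length := by
  have hperm := PySem.List.sorted2_perm (PySem.Dict.counter s).items Prod.fst Prod.snd false
  simp only [List.length_flatMap, PySem.List.pyRepeat_singleton, List.length_replicate]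
  have hsum := (hperm.map (fun (t : Char × Int) => (t.2 - 1).toNat)).sum_eq
  rw [hsum, PySem.Dict.items_counter, List.map_map]
  have hcong : (PySem.Set.ofList s).map ((fun (t : Char × Int) => (t.2 - 1).toNat) ∘ fun k => (k, (s.count k : Int)))
      = (PySem.Set.ofList s).map (fun c => s.count c - 1) := by
    apply List.map_congr_left
    intro c _
    simp only [Function.comp_apply]
    omega
  rw [hcong]
  have hpos : ∀ c ∈ PySem.Set.ofList s, 1 ≤ s.count c := by
    intro c hc
    exact List.count_pos_iff.2 ((PySem.Set.mem_ofList s c).1 hc)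
  have h1 := pvSumMapSubOne (PySem.Set.ofList s) (fun c => s.count c) hpos
  beta_reduce at h1
  have h2 := pvSumCountOfList s
  have hlen : 1 ≤ (PySem.Set.ofList s).length := by
    rcases s with _ | ⟨c, t⟩
    · exact absurd rfl hs
    · have : c ∈ PySem.Set.ofList (c :: t) := (PySem.Set.mem_ofList _ _).2 (by simp)
      exact List.length_pos_iff.2 (List.ne_nil_of_mem this)
  omega

def solutionGo (src : List Char) (dest : List Char) : List Char :=
  if hs : src = [] then dest
  else
    -- tmp = sorted(Counter(source).items())
    let tmp := PySem.List.sorted2 (PySem.Dict.counter src).items Prod.fst Prod.snd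
    -- for i in range(len(tmp)): dest += tmp[i][0]; new_source += tmp[i][0] * (tmp[i][1] - 1)
    let st := List.foldl (fun (p : List Char × List Char) t =>
        (p.1 ++ [t.1], p.2 ++ PySem.List.pyRepeat [t.1] (t.2 - 1))) (dest, ([] : List Char)) tmp
    solutionGo st.2 st.1
termination_by src.length
decreasing_by
  rw [PySem.List.foldl_prod_mk (f := fun acc (t : Char × Int) => acc ++ [t.1])
      (g := fun acc (t : Char × Int) => acc ++ PySem.List.pyRepeat [t.1] (t.2 - 1)),
    PySem.List.foldl_append_eq_flatMap]
  simpa [PySem.List.pyRepeat_singleton, List.length_flatMap, Function.comp_def] using pvNewSourceLen src hs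

def solution (source : String) : String := String.ofList (solutionGo source.toList [])

-- ===== PORT B =====
def solution_alt (source : String) : String :=
  let counts := PySem.Dict.counter source.toList
  if counts.items = [] then String.ofList []
  else
    match PySem.List.max? counts.values (fun v => v) with
    | none => String.ofList []   -- unreachable: counts is non-empty, so max(values) exists
    | some rounds =>
      let parts := (PySem.List.pyRange 1 (rounds + 1)).foldl
        (fun acc k => acc ++
          [PySem.List.sorted (counts.keys.filter (fun c => decide (k ≤ counts.getD c 0))) (fun c => c)]) []
      String.ofList parts.flatten

-- ===== PRECONDITION & SPEC =====
def Spec_solution (source : String) (out : String) : Prop := out = solution_alt source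
instance (source : String) (out : String) : Decidable (Spec_solution source out) := by unfold Spec_solution; infer_instance

-- ===== CLAIM (what is proved, stated in full; the proofs are below) =====
def Claim_equal_solution : Prop := ∀ (source : String), Dom_solution source → Spec_solution source (solution source)

-- ===== LEMMAS AND PROOFS =====

-- one round's sorted output: the sorted distinct characters of s whose count is ≥ k
def pvChunk (s : List Char) (k : Int) : List Char :=
  PySem.List.sorted ((PySem.Set.ofList s).filter (fun c => decide (k ≤ (s.count c : Int)))) (fun c => c)

-- the full output, expressed round-by-round up to bound M
def pvCanon (s : List Char) (M : Int) : List Char :=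
  (PySem.List.pyRange 1 (M + 1)).flatMap (fun k => pvChunk s k)

-- the string A rebuilds for the next round
def pvNext (s : List Char) : List Char :=
  (PySem.List.sorted (PySem.Set.ofList s) (fun c => c)).flatMap
    (fun c => List.replicate ((s.count c : Int) - 1).toNat c)

theorem pvInsertByCongr {α : Type} (b1 b2 : α → α → Bool) (x : α) (ys : List α)
    (h : ∀ y ∈ ys, b1 x y = b2 x y) :
    PySem.List.insertBy b1 x ys = PySem.List.insertBy b2 x ys := by
  induction ys with
  | nil => rfl
  | cons y t ih =>
    have hy := h y (by simp)
    simp only [PySem.List.insertBy, hy]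
    by_cases hc : b2 x y = true
    · simp [hc]
    · simp only [Bool.not_eq_true] at hc
      have := ih (fun z hz => h z (by simp [hz]))
      simp [hc, this]

-- on pairs with pairwise-distinct first components, Python's tuple sort is the sort by fst
theorem pvSorted2Fst (xs : List (Char × Int)) (hx : xs.Pairwise (fun a b => a.1 ≠ b.1)) :
    PySem.List.sorted2 xs Prod.fst Prod.snd = PySem.List.sorted xs Prod.fst := by
  simp only [PySem.List.sorted2, PySem.List.sorted]
  suffices h : ∀ (l acc : List (Char × Int)), l.Pairwise (fun a b => a.1 ≠ b.1) →
      (∀ a ∈ l, ∀ b ∈ acc, a.1 ≠ b.1) →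
      List.foldl (fun acc x => PySem.List.insertBy
          (fun a b => decide (a.1 < b.1) || (!decide (b.1 < a.1) && decide (a.2 < b.2))) x acc) acc l
        = List.foldl (fun acc x => PySem.List.insertBy (fun a b => decide (a.1 < b.1)) x acc) acc l by
    exact h xs [] hx (by simp)
  intro l
  induction l with
  | nil => intro acc _ _; rfl
  | cons x t ih =>
    intro acc hp hdisj
    rcases List.pairwise_cons.1 hp with ⟨hxt, ht⟩
    have hins : PySem.List.insertBy
        (fun a b => decide (a.1 < b.1) || (!decide (b.1 < a.1) && decide (a.2 < b.2))) x acc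
        = PySem.List.insertBy (fun a b => decide (a.1 < b.1)) x acc := by
      apply pvInsertByCongr
      intro y hy
      have hne : x.1 ≠ y.1 := hdisj x (by simp) y hy
      rcases lt_trichotomy x.1 y.1 with hlt | heq | hgt
      · simp [hlt, not_lt_of_gt hlt]
      · exact absurd heq hne
      · simp [hgt, not_lt_of_gt hgt]
    simp only [List.foldl_cons, hins]
    apply ih _ ht
    intro a ha b hb
    have hb' := (PySem.List.mem_insertBy _ _ _ _).1 hb
    rcases hb' with rfl | hb''
    · exact (hxt a ha).symm
    · exact hdisj a (by simp [ha]) b hb''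

-- tmp in A's loop, in closed form
theorem pvTmpEq (s : List Char) :
    PySem.List.sorted2 (PySem.Dict.counter s).items Prod.fst Prod.snd
      = (PySem.List.sorted (PySem.Set.ofList s) (fun c => c)).map (fun c => (c, (s.count c : Int))) := by
  have hitems := PySem.Dict.items_counter s
  have hpair : (PySem.Dict.counter s).items.Pairwise (fun a b => a.1 ≠ b.1) := by
    rw [hitems, List.pairwise_map]
    exact (PySem.Set.nodup_ofList s).imp (by intro a b hab; simpa using hab)
  rw [pvSorted2Fst _ hpair]
  apply PySem.List.sorted_eq_of_perm_of_pairwise_lt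
  · rw [hitems]
    exact (PySem.List.sorted_perm (PySem.Set.ofList s) (fun c => c) false).map _
  · rw [List.pairwise_map]
    exact (PySem.List.sorted_ofList_pairwise_lt s).imp (by intro a b hab; simpa using hab)

theorem pvCountFlatMapRep (L : List Char) (hL : L.Nodup) (cn : Char → Nat) (c0 : Char) :
    (L.flatMap (fun c => List.replicate (cn c) c)).count c0 = if c0 ∈ L then cn c0 else 0 := by
  induction L with
  | nil => simp
  | cons x t ih =>
    simp only [List.flatMap_cons, List.count_append, List.nodup_cons] at *
    rcases hL with ⟨hx, ht⟩
    by_cases hcx : c0 = x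
    · subst hcx
      simp [ih ht, hx]
    · simp [ih ht, List.count_replicate, hcx, Ne.symm hcx]

theorem pvSortedOfListNodup (s : List Char) :
    (PySem.List.sorted (PySem.Set.ofList s) (fun c => c)).Nodup :=
  ((PySem.List.sorted_perm (PySem.Set.ofList s) (fun c => c) false).nodup_iff).2
    (PySem.Set.nodup_ofList s)

theorem pvCountNext (s : List Char) (c : Char) : (pvNext s).count c = s.count c - 1 := by
  unfold pvNext
  rw [pvCountFlatMapRep _ (pvSortedOfListNodup s) _ c]
  by_cases hc : c ∈ s
  · simp [PySem.List.mem_sorted, PySem.Set.mem_ofList, hc]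
  · have h0 : s.count c = 0 := List.count_eq_zero.2 hc
    simp [PySem.List.mem_sorted, PySem.Set.mem_ofList, hc, h0]

theorem pvMemNext (s : List Char) (c : Char) : c ∈ pvNext s ↔ 2 ≤ s.count c := by
  rw [← List.count_pos_iff, pvCountNext]
  omega

theorem pvNextLen (s : List Char) (hs : s ≠ []) : (pvNext s).length < s.length := by
  have h := pvNewSourceLen s hs
  rw [pvTmpEq] at h
  unfold pvNext
  rw [List.flatMap_map] at h
  simpa [PySem.List.pyRepeat_singleton, Function.comp_def] using h

theorem pvChunkNext (s : List Char) (k : Int) (hk : 1 ≤ k) :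
    pvChunk (pvNext s) k = pvChunk s (k + 1) := by
  unfold pvChunk
  apply PySem.List.sorted_eq_sorted_of_perm _ _ _ (fun a b h => h)
  apply (List.perm_ext_iff_of_nodup ((PySem.Set.nodup_ofList _).filter _)
    ((PySem.Set.nodup_ofList _).filter _)).2
  intro c
  simp only [List.mem_filter, PySem.Set.mem_ofList, decide_eq_true_eq]
  rw [← List.count_pos_iff, ← List.count_pos_iff, pvCountNext]
  omega

theorem pvRangeMapAdd (a b : Int) :
    (PySem.List.pyRange a b).map (fun k => k + 1) = PySem.List.pyRange (a + 1) (b + 1) := by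
  suffices H : ∀ (n : Nat) (a b : Int), (b - a).toNat = n →
      (PySem.List.pyRange a b).map (fun k => k + 1) = PySem.List.pyRange (a + 1) (b + 1) from
    H (b - a).toNat a b rfl
  intro n
  induction n with
  | zero =>
    intro a b h
    have hle : b ≤ a := by omega
    rw [PySem.List.pyRange_one_eq_nil hle, PySem.List.pyRange_one_eq_nil (by omega)]
    rfl
  | succ n ih =>
    intro a b h
    have hlt : a < b := by omega
    rw [PySem.List.pyRange_one_cons hlt, PySem.List.pyRange_one_cons (by omega : a + 1 < b + 1)]
    simp only [List.map_cons]
    rw [ih (a + 1) b (by omega)]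

theorem pvChunkOne (s : List Char) :
    pvChunk s 1 = PySem.List.sorted (PySem.Set.ofList s) (fun c => c) := by
  unfold pvChunk
  congr 1
  apply List.filter_eq_self.2
  intro c hc
  have hcs : c ∈ s := (PySem.Set.mem_ofList s c).1 hc
  have : 1 ≤ s.count c := List.count_pos_iff.2 hcs
  simp
  omega

theorem pvCanonNil (M : Int) : pvCanon [] M = [] := by
  unfold pvCanon
  apply List.flatMap_eq_nil_iff.2
  intro k _
  unfold pvChunk
  rfl

theorem pvFlatMapCongr {α β : Type} {l : List α} {f g : α → List β}
    (h : ∀ x ∈ l, f x = g x) : l.flatMap f = l.flatMap g := by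
  simp only [List.flatMap_def]
  rw [List.map_congr_left h]

theorem pvCanonStep (s : List Char) (M : Int) (hs : s ≠ [])
    (hM : ∀ c ∈ s, (s.count c : Int) ≤ M) :
    pvCanon s M = pvChunk s 1 ++ pvCanon (pvNext s) (M - 1) := by
  have hM1 : 1 ≤ M := by
    rcases s with _ | ⟨c, t⟩
    · exact absurd rfl hs
    · have h1 : 1 ≤ ((c :: t).count c : Int) := by
        have := List.count_pos_iff.2 (show c ∈ c :: t by simp)
        omega
      have := hM c (by simp)
      omega
  unfold pvCanon
  rw [PySem.List.pyRange_one_cons (by omega : (1:Int) < M + 1), List.flatMap_cons]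
  congr 1
  rw [show M - 1 + 1 = M by ring]
  rw [← pvRangeMapAdd 1 M, List.flatMap_map]
  apply pvFlatMapCongr
  intro k hk
  have hk1 : 1 ≤ k := ((PySem.List.mem_pyRange_one).1 hk).1
  exact (pvChunkNext s k hk1).symm

theorem pvGoCons (s dest : List Char) (hs : s ≠ []) :
    solutionGo s dest = solutionGo (pvNext s) (dest ++ pvChunk s 1) := by
  rw [solutionGo]
  rw [dif_neg hs]
  show solutionGo
      (List.foldl (fun (p : List Char × List Char) t =>
        (p.1 ++ [t.1], p.2 ++ PySem.List.pyRepeat [t.1] (t.2 - 1))) (dest, ([] : List Char))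
        (PySem.List.sorted2 (PySem.Dict.counter s).items Prod.fst Prod.snd)).2
      (List.foldl (fun (p : List Char × List Char) t =>
        (p.1 ++ [t.1], p.2 ++ PySem.List.pyRepeat [t.1] (t.2 - 1))) (dest, ([] : List Char))
        (PySem.List.sorted2 (PySem.Dict.counter s).items Prod.fst Prod.snd)).1 = _
  rw [PySem.List.foldl_prod_mk (f := fun acc (t : Char × Int) => acc ++ [t.1])
      (g := fun acc (t : Char × Int) => acc ++ PySem.List.pyRepeat [t.1] (t.2 - 1)),
    PySem.List.foldl_append_singleton_eq_map, PySem.List.foldl_append_eq_flatMap]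
  rw [pvTmpEq, List.flatMap_map, List.map_map]
  congr 1
  · simp only [PySem.List.pyRepeat_singleton]
    rfl
  · rw [pvChunkOne]
    simp [Function.comp_def]

theorem pvGoEq (N : Nat) : ∀ (s : List Char), s.length ≤ N → ∀ (dest : List Char) (M : Int),
    (∀ c ∈ s, (s.count c : Int) ≤ M) → 0 ≤ M →
    solutionGo s dest = dest ++ pvCanon s M := by
  induction N with
  | zero =>
    intro s hlen dest M _ _
    have hs : s = [] := List.length_eq_zero_iff.1 (by omega)
    subst hs
    rw [solutionGo, dif_pos rfl, pvCanonNil, List.append_nil]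
  | succ N ih =>
    intro s hlen dest M hM h0
    by_cases hs : s = []
    · subst hs
      rw [solutionGo, dif_pos rfl, pvCanonNil, List.append_nil]
    · have hM1 : 1 ≤ M := by
        rcases s with _ | ⟨c, t⟩
        · exact absurd rfl hs
        · have h1 : 1 ≤ ((c :: t).count c : Int) := by
            have := List.count_pos_iff.2 (show c ∈ c :: t by simp)
            omega
          have := hM c (by simp)
          omega
      rw [pvGoCons s dest hs]
      have hlt := pvNextLen s hs
      rw [ih (pvNext s) (by omega) (dest ++ pvChunk s 1) (M - 1) ?_ (by omega)]
      · rw [pvCanonStep s M hs hM, List.append_assoc]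
      · intro c hc
        have hcs : c ∈ s := by
          have := (pvMemNext s c).1 hc
          exact List.count_pos_iff.1 (by omega)
        have := hM c hcs
        have hcount := pvCountNext s c
        have h2 := (pvMemNext s c).1 hc
        omega

theorem solution_spec' (source : String) : solution source = solution_alt source := by
  rcases hl : source.toList with _ | ⟨c, t⟩
  · unfold solution solution_alt
    rw [hl, solutionGo, dif_pos rfl]
    rfl
  · have hlne : source.toList ≠ [] := by rw [hl]; simp
    have hcS : c ∈ PySem.Set.ofList source.toList :=
      (PySem.Set.mem_ofList _ _).2 (by rw [hl]; simp)
    have hSne : PySem.Set.ofList source.toList ≠ [] := List.ne_nil_of_mem hcS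
    have hitems := PySem.Dict.items_counter source.toList
    have hine : (PySem.Dict.counter source.toList).items ≠ [] := by
      rw [hitems]
      intro h
      exact hSne (List.map_eq_nil_iff.1 h)
    have hvals : (PySem.Dict.counter source.toList).values
        = (PySem.Set.ofList source.toList).map (fun c => (source.toList.count c : Int)) := by
      simp only [PySem.Dict.values, hitems, List.map_map]
      rfl
    have hvne : (PySem.Dict.counter source.toList).values ≠ [] := by
      rw [hvals]
      intro h
      exact hSne (List.map_eq_nil_iff.1 h)
    obtain ⟨v, t', hv⟩ := List.exists_cons_of_ne_nil hvne
    have hmax : PySem.List.max? (PySem.Dict.counter source.toList).values (fun y => y)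
        = some (t'.foldl max v) := by
      rw [hv]
      exact PySem.List.max?_id_cons v t'
    set m := t'.foldl max v with hm
    have hM : ∀ c' ∈ source.toList, (source.toList.count c' : Int) ≤ m := by
      intro c' hc'
      have hmem : (source.toList.count c' : Int) ∈ (PySem.Dict.counter source.toList).values := by
        rw [hvals]
        exact List.mem_map.2 ⟨c', (PySem.Set.mem_ofList _ _).2 hc', rfl⟩
      exact PySem.List.max?_isMax hmax _ hmem
    have h0 : 0 ≤ m := by
      have hmem := PySem.List.max?_mem hmax
      rw [hvals] at hmem
      obtain ⟨c0, _, hc0⟩ := List.mem_map.1 hmem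
      rw [← hc0]
      exact Int.natCast_nonneg _
    have hA : solution source = String.ofList (pvCanon source.toList m) := by
      unfold solution
      rw [pvGoEq source.toList.length source.toList le_rfl [] m hM h0]
      rfl
    have hB : solution_alt source = String.ofList (pvCanon source.toList m) := by
      unfold solution_alt
      rw [if_neg hine, hmax]
      show String.ofList ((PySem.List.pyRange 1 (m + 1)).foldl
        (fun acc k => acc ++
          [PySem.List.sorted ((PySem.Dict.counter source.toList).keys.filter
            (fun c => decide (k ≤ (PySem.Dict.counter source.toList).getD c 0))) (fun c => c)]) []).flatten
        = _
      rw [PySem.List.foldl_append_singleton_eq_map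
        (f := fun k => PySem.List.sorted ((PySem.Dict.counter source.toList).keys.filter
            (fun c => decide (k ≤ (PySem.Dict.counter source.toList).getD c 0))) (fun c => c))]
      rw [List.nil_append]
      have hchunks : (PySem.List.pyRange 1 (m + 1)).map
          (fun k => PySem.List.sorted ((PySem.Dict.counter source.toList).keys.filter
            (fun c => decide (k ≤ (PySem.Dict.counter source.toList).getD c 0))) (fun c => c))
          = (PySem.List.pyRange 1 (m + 1)).map (fun k => pvChunk source.toList k) := by
        apply List.map_congr_left
        intro k _
        unfold pvChunk
        congr 1
        rw [PySem.Dict.keys_counter]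
        apply List.filter_congr
        intro c0 _
        rw [PySem.Dict.getD_counter]
      rw [hchunks]
      unfold pvCanon
      rw [List.flatMap_def]
    rw [hA, hB]

-- ===== VERDICT (by name: the statement is the Claim_ definition above) =====
theorem solution_spec : Claim_equal_solution := by
  intro source _
  exact solution_spec' source
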